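-- pv_equiv track=rewrite | github.com/ManushiKhatri/LearningDSA | codesignal/count_diff.py | solution
-- ===== SOURCE A (Python) =====
-- def solution(nums):
--     final_result = 0
--     encodings, visited = {},{}
--     for num in nums:
--         str_num = str(num)
--         for i in range(len(str_num)):
--             num_encoding = str_num[:i] + "*" + str_num[i + 1:]
--             if num_encoding not in encodings:
--                 encodings[num_encoding] = 0
--             else:
--                 encodings[num_encoding] += 1
--                 if num in visited:
--                     final_result += encodings[num_encoding] - visited[num]
--                 else:
--                     final_result += encodings[num_encoding]
--         if num not in visited:
--             visited[num] = 0
--         visited[num] += 1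
--     return final_result
-- ===== SOURCE B (Python) =====
-- def solution(nums):
--     count = 0
--     prefix = []
--     for t in map(str, nums):
--         for s in prefix:
--             if len(s) == len(t) and sum(a != b for a, b in zip(s, t)) == 1:
--                 count += 1
--         prefix.append(t)
--     return count
-- ===== Notes on version B (the rewrite author's own statement) =====
-- stated objective: simpler
-- what changed: Replaced A's wildcard-encoding hash-map trick (per-number digit-masked keys with an encodings/visited bookkeeping dict) by the direct all-pairs scan that compares the decimal string of each number with each earlier one character by character and counts pairs with exactly one mismatching position.
import Mathlib
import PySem

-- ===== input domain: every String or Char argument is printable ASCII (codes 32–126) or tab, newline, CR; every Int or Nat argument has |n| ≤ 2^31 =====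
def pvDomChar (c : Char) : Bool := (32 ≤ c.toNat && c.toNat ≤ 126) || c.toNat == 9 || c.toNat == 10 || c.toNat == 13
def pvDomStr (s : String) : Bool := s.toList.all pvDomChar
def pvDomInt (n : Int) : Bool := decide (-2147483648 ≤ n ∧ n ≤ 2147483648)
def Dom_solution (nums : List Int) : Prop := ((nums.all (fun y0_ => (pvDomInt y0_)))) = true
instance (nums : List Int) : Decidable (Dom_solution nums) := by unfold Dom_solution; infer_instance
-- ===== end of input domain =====

-- B replaces A's wildcard-encoding dict bookkeeping by a direct all-pairs one-mismatch scan (a simpler algorithm; not faster).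

-- ===== PORT A =====
-- inner loop body: for i in range(len(str_num)): … (visited is only read here)
def innerStepA (visited : PySem.Dict Int Int) (num : Int) (str_num : String)
    (st2 : Int × PySem.Dict String Int) (i : Int) : Int × PySem.Dict String Int :=
  let num_encoding := PySem.Str.slice str_num none (some i) ++ "*" ++ PySem.Str.slice str_num (some (i + 1)) none
  if st2.2.contains num_encoding = false then
    (st2.1, st2.2.insert num_encoding 0)
  else
    let encodings' := st2.2.insert num_encoding (st2.2.getD num_encoding 0 + 1)
    if visited.contains num then
      (st2.1 + encodings'.getD num_encoding 0 - visited.getD num 0, encodings')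
    else
      (st2.1 + encodings'.getD num_encoding 0, encodings')

-- outer loop body: for num in nums: …  (state = (final_result, encodings, visited))
def stepA (st : Int × PySem.Dict String Int × PySem.Dict Int Int) (num : Int) :
    Int × PySem.Dict String Int × PySem.Dict Int Int :=
  let str_num := PySem.Int.toStr num
  let inner := (PySem.List.pyRange 0 (PySem.Str.len str_num) 1).foldl (innerStepA st.2.2 num str_num) (st.1, st.2.1)
  let visited1 := if st.2.2.contains num = false then st.2.2.insert num 0 else st.2.2
  (inner.1, inner.2, visited1.insert num (visited1.getD num 0 + 1))

def solution (nums : List Int) : Int :=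
  (nums.foldl stepA (0, PySem.Dict.empty, PySem.Dict.empty)).1

-- ===== PORT B =====
-- for t in map(str, nums): for s in prefix: count += (len(s)==len(t) and mismatches==1); prefix.append(t)
def stepB (st : Int × List String) (num : Int) : Int × List String :=
  let t := PySem.Int.toStr num
  let c := st.2.foldl (fun c s =>
    if PySem.Str.len s = PySem.Str.len t ∧
       (((s.toList.zip t.toList).countP (fun p => p.1 != p.2) : Int)) = 1
    then c + 1 else c) st.1
  (c, st.2 ++ [t])

def solution_alt (nums : List Int) : Int :=
  (nums.foldl stepB (0, [])).1

-- ===== PRECONDITION & SPEC =====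
def Spec_solution (nums : List Int) (out : Int) : Prop := out = solution_alt nums
instance (nums : List Int) (out : Int) : Decidable (Spec_solution nums out) := by unfold Spec_solution; infer_instance

-- ===== CLAIM (what is proved, stated in full; the proofs are below) =====
def Claim_equal_solution : Prop := ∀ (nums : List Int), Dom_solution nums → Spec_solution nums (solution nums)

-- ===== LEMMAS AND PROOFS =====

lemma digitChar_inj {a b : Nat} (ha : a < 10) (hb : b < 10) (h : Nat.digitChar a = Nat.digitChar b) : a = b := by
  interval_cases a <;> interval_cases b <;> first | rfl | (exfalso; revert h; decide)

lemma toDigitsCore_chars (f : Nat) : ∀ (n : Nat) (ds : List Char), ∀ c ∈ Nat.toDigitsCore 10 f n ds,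
    c ∈ ds ∨ ∃ k, k < 10 ∧ c = Nat.digitChar k := by
  induction f with
  | zero => intro n ds c hc; exact Or.inl hc
  | succ f ih =>
    intro n ds c hc
    rw [Nat.toDigitsCore] at hc
    by_cases h : n / 10 = 0
    · simp only [h] at hc
      rcases List.mem_cons.1 hc with h1 | h1
      · exact Or.inr ⟨n % 10, Nat.mod_lt _ (by norm_num), h1⟩
      · exact Or.inl h1
    · simp only [if_neg h] at hc
      rcases ih _ _ c hc with h1 | h1
      · rcases List.mem_cons.1 h1 with h2 | h2
        · exact Or.inr ⟨n % 10, Nat.mod_lt _ (by norm_num), h2⟩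
        · exact Or.inl h2
      · exact Or.inr h1

lemma toDigits_chars {n : Nat} {c : Char} (h : c ∈ Nat.toDigits 10 n) : c.isDigit = true := by
  rcases toDigitsCore_chars (n+1) n [] c h with h1 | ⟨k, hk, rfl⟩
  · simp at h1
  · interval_cases k <;> decide

lemma toDigitsCore_eq_digits (f : Nat) : ∀ (n : Nat) (ds : List Char), 0 < n → n < 10 ^ f →
    Nat.toDigitsCore 10 f n ds = ((Nat.digits 10 n).map Nat.digitChar).reverse ++ ds := by
  induction f with
  | zero => intro n ds hn hf; omega
  | succ f ih =>
    intro n ds hn hf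
    rw [Nat.toDigitsCore]
    rw [Nat.digits_def' (by norm_num : (1:Nat) < 10) hn]
    by_cases h : n / 10 = 0
    · simp [h, Nat.digits_zero]
    · rw [if_neg h, ih (n / 10) _ (Nat.pos_of_ne_zero h) (by
        rw [Nat.div_lt_iff_lt_mul (by norm_num)]
        calc n < 10 ^ (f+1) := hf
        _ = 10 ^ f * 10 := by ring)]
      simp

lemma toDigits_eq {n : Nat} (h : 0 < n) :
    Nat.toDigits 10 n = ((Nat.digits 10 n).map Nat.digitChar).reverse := by
  have : n < 10 ^ (n + 1) := by
    calc n < 2 ^ n := Nat.lt_two_pow_self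
    _ ≤ 10 ^ n := Nat.pow_le_pow_left (by norm_num) n
    _ ≤ 10 ^ (n+1) := Nat.pow_le_pow_right (by norm_num) (Nat.le_succ n)
  rw [Nat.toDigits, toDigitsCore_eq_digits (n+1) n [] h this, List.append_nil]

lemma map_digitChar_inj : ∀ (l1 l2 : List Nat), (∀ x ∈ l1, x < 10) → (∀ x ∈ l2, x < 10) →
    l1.map Nat.digitChar = l2.map Nat.digitChar → l1 = l2 := by
  intro l1
  induction l1 with
  | nil => intro l2 _ _ h; cases l2 <;> simp_all
  | cons a l ih =>
    intro l2 h1 h2 h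
    cases l2 with
    | nil => simp at h
    | cons b l' =>
      simp only [List.map_cons, List.cons.injEq] at h
      have := digitChar_inj (h1 a (by simp)) (h2 b (by simp)) h.1
      subst this
      rw [ih l' (fun x hx => h1 x (by simp [hx])) (fun x hx => h2 x (by simp [hx])) h.2]

lemma toDigits_inj {a b : Nat} (h : Nat.toDigits 10 a = Nat.toDigits 10 b) : a = b := by
  rcases Nat.eq_zero_or_pos a with ha | ha <;> rcases Nat.eq_zero_or_pos b with hb | hb
  · omega
  · exfalso
    subst ha
    rw [toDigits_eq hb] at h
    have h' : (Nat.digits 10 b).map Nat.digitChar = ['0'] := by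
      have := congrArg List.reverse h
      simpa using this.symm
    cases hd : Nat.digits 10 b with
    | nil => rw [hd] at h'; simp at h'
    | cons d l =>
      rw [hd] at h'
      cases l with
      | nil =>
        simp only [List.map_cons, List.map_nil, List.cons.injEq] at h'
        have hd10 : d < 10 := Nat.digits_lt_base (by norm_num) (by rw [hd]; simp)
        have : d = 0 := digitChar_inj hd10 (by norm_num) (by rw [h'.1]; rfl)
        have hd0 : Nat.digits 10 b = [0] := by rw [hd, this]
        have := Nat.ofDigits_digits 10 b
        rw [hd0] at this
        simp [Nat.ofDigits] at this
        omega
      | cons d' l' => simp at h'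
  · exfalso
    subst hb
    rw [toDigits_eq ha] at h
    have h' : (Nat.digits 10 a).map Nat.digitChar = ['0'] := by
      have := congrArg List.reverse h
      simpa using this
    cases hd : Nat.digits 10 a with
    | nil => rw [hd] at h'; simp at h'
    | cons d l =>
      rw [hd] at h'
      cases l with
      | nil =>
        simp only [List.map_cons, List.map_nil, List.cons.injEq] at h'
        have hd10 : d < 10 := Nat.digits_lt_base (by norm_num) (by rw [hd]; simp)
        have : d = 0 := digitChar_inj hd10 (by norm_num) (by rw [h'.1]; rfl)
        have hd0 : Nat.digits 10 a = [0] := by rw [hd, this]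
        have := Nat.ofDigits_digits 10 a
        rw [hd0] at this
        simp [Nat.ofDigits] at this
        omega
      | cons d' l' => simp at h'
  · rw [toDigits_eq ha, toDigits_eq hb] at h
    have h' := List.reverse_injective h
    have := map_digitChar_inj _ _ (fun x hx => Nat.digits_lt_base (by norm_num) hx)
      (fun x hx => Nat.digits_lt_base (by norm_num) hx) h'
    have h2 := congrArg (Nat.ofDigits 10) this
    rwa [Nat.ofDigits_digits, Nat.ofDigits_digits] at h2

lemma toDigits_ne_nil (n : Nat) : Nat.toDigits 10 n ≠ [] := by
  rcases Nat.eq_zero_or_pos n with h | h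
  · subst h; decide
  · rw [toDigits_eq h]
    simp only [ne_eq, List.reverse_eq_nil_iff, List.map_eq_nil_iff]
    exact Nat.digits_ne_nil_iff_ne_zero.2 (Nat.pos_iff_ne_zero.1 h)

lemma toChars_star (n : Int) : '*' ∉ PySem.Int.toChars n := by
  unfold PySem.Int.toChars
  split
  · intro h
    rcases List.mem_cons.1 h with h1 | h1
    · exact absurd h1 (by decide)
    · exact absurd (toDigits_chars h1) (by decide)
  · intro h
    exact absurd (toDigits_chars h) (by decide)

lemma toChars_inj {a b : Int} (h : PySem.Int.toChars a = PySem.Int.toChars b) : a = b := by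
  unfold PySem.Int.toChars at h
  split at h <;> split at h
  · simp only [List.cons.injEq] at h
    have := toDigits_inj h.2
    omega
  · exfalso
    cases hd : Nat.toDigits 10 b.toNat with
    | nil => exact toDigits_ne_nil _ hd
    | cons c l =>
      rw [hd] at h
      have : c ∈ Nat.toDigits 10 b.toNat := by rw [hd]; simp
      have := toDigits_chars this
      have hc : c = '-' := by
        have := congrArg (·.headI) h
        simpa using this.symm
      rw [hc] at this
      exact absurd this (by decide)
  · exfalso
    cases hd : Nat.toDigits 10 a.toNat with
    | nil => exact toDigits_ne_nil _ hd
    | cons c l =>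
      rw [hd] at h
      have hmem : c ∈ Nat.toDigits 10 a.toNat := by rw [hd]; simp
      have := toDigits_chars hmem
      have hc : c = '-' := by
        have := congrArg (·.headI) h
        simpa using this
      rw [hc] at this
      exact absurd this (by decide)
  · have := toDigits_inj h
    omega

def mm (s t : List Char) : Nat := (s.zip t).countP (fun p => p.1 != p.2)
def enc (s : List Char) (i : Nat) : List Char := s.take i ++ '*' :: s.drop (i + 1)
abbrev mex (s t : List Char) (i : Nat) : Prop := s.take i = t.take i ∧ s.drop (i + 1) = t.drop (i + 1)

lemma mm_comm (s : List Char) : ∀ t, mm s t = mm t s := by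
  induction s with
  | nil => intro t; cases t <;> rfl
  | cons a s ih =>
    intro t
    cases t with
    | nil => rfl
    | cons b t => simp [mm, List.countP_cons, bne_comm]; rw [show (s.zip t).countP (fun p => p.1 != p.2) = mm s t from rfl, ih t]; rfl

lemma mm_eq_zero {s : List Char} : ∀ {t : List Char}, s.length = t.length → (mm s t = 0 ↔ s = t) := by
  induction s with
  | nil => intro t hl; cases t with
    | nil => simp [mm]
    | cons b t => simp at hl
  | cons a s ih =>
    intro t hl
    cases t with
    | nil => simp at hl
    | cons b t =>
      simp only [List.length_cons, Nat.add_right_cancel_iff] at hl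
      simp only [mm, List.zip_cons_cons, List.countP_cons]
      constructor
      · intro h
        cases hab : (a != b) with
        | true => simp [hab] at h
        | false =>
          simp only [hab, if_false] at h
          have := (ih hl).1 h
          simp only [bne_eq_false_iff_eq] at hab
          simp [hab, this]
      · rintro h
        injection h with h1 h2
        subst h1; subst h2
        have := (ih hl).2 rfl
        simp only [mm] at this
        simp [this]

lemma mex_zero {a b : Char} {s t : List Char} : mex (a :: s) (b :: t) 0 ↔ s = t := by
  simp [mex]

lemma mex_succ {a b : Char} {s t : List Char} {i : Nat} :
    mex (a :: s) (b :: t) (i + 1) ↔ a = b ∧ mex s t i := by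
  simp [mex, List.take_succ_cons, List.drop_succ_cons, and_assoc]

lemma countP_mex (s : List Char) : ∀ (t : List Char), s.length = t.length →
    (List.range s.length).countP (fun i => decide (mex s t i)) =
      if s = t then s.length else if mm s t = 1 then 1 else 0 := by
  induction s with
  | nil => intro t hl; cases t with
    | nil => simp
    | cons b t => simp at hl
  | cons a s ih =>
    intro t hl
    cases t with
    | nil => simp at hl
    | cons b t =>
      simp only [List.length_cons, Nat.add_right_cancel_iff] at hl
      rw [List.length_cons, List.range_succ_eq_map, List.countP_cons, List.countP_map]
      have hzero : (decide (mex (a :: s) (b :: t) 0) = true) ↔ s = t := by simp [mex_zero]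
      have hsucc : ∀ i, ((fun i => decide (mex (a :: s) (b :: t) i)) ∘ Nat.succ) i
          = decide (a = b ∧ mex s t i) := by
        intro i; simp [Function.comp, mex_succ]
      rw [List.countP_congr (fun i _ => by rw [hsucc i])]
      have hmm : mm (a :: s) (b :: t) = (if a = b then 0 else 1) + mm s t := by
        simp only [mm, List.zip_cons_cons, List.countP_cons]
        by_cases hab : a = b <;> simp [hab] <;> omega
      by_cases hab : a = b
      · subst hab
        have : ∀ i, decide (a = a ∧ mex s t i) = decide (mex s t i) := by intro i; simp
        rw [List.countP_congr (fun i _ => by rw [this i]), ih t hl]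
        by_cases hst : s = t
        · subst hst; simp [hmm, mex_zero]
        · have hne : (a :: s) ≠ (a :: t) := by simp [hst]
          have : (decide (mex (a :: s) (a :: t) 0)) = false := by
            simp [mex_zero]; exact hst
          simp only [this, if_false, hne, if_neg, hmm]
          simp [hst, hne]
      · have : ∀ i, decide (a = b ∧ mex s t i) = false := by intro i; simp [hab]
        rw [List.countP_congr (fun i _ => by rw [this i]), List.countP_false]
        have hne : (a :: s) ≠ (b :: t) := by simp [hab]
        by_cases hst : s = t
        · have h1 : mm s t = 0 := by rw [mm_eq_zero hl]; exact hst
          subst hst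
          simp [hne, mex_zero, hmm, hab, h1]
        · have h1 : mm s t ≠ 0 := by rw [Ne, mm_eq_zero hl]; exact hst
          have : (decide (mex (a :: s) (b :: t) 0)) = false := by simp [mex_zero]; exact hst
          simp only [this, if_false, hne, hmm]
          simp [hab, hst]
          omega

lemma length_enc {s : List Char} {i : Nat} (hi : i < s.length) : (enc s i).length = s.length := by
  simp [enc]
  omega

lemma getElem?_enc_self {s : List Char} {i : Nat} (hi : i < s.length) :
    (enc s i)[i]? = some '*' := by
  have ht : (s.take i).length = i := by simp; omega
  simp only [enc]
  rw [List.getElem?_append_right (by omega)]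
  simp [ht]

lemma getElem?_enc_ne {s : List Char} {i j : Nat} (hi : i < s.length) (hj : j < s.length)
    (hne : j ≠ i) : (enc s i)[j]? = s[j]? := by
  have ht : (s.take i).length = i := by simp; omega
  simp only [enc]
  rcases Nat.lt_or_ge j i with hji | hji
  · rw [List.getElem?_append_left (by omega)]
    rw [List.getElem?_take_of_lt hji]
  · have hji' : i < j := by omega
    rw [List.getElem?_append_right (by omega), ht]
    have : j - i = (j - i - 1) + 1 := by omega
    rw [this, List.getElem?_cons_succ, List.getElem?_drop]
    congr 1
    omega

lemma enc_eq_iff {s t : List Char} {i j : Nat} (hs : '*' ∉ s) (ht : '*' ∉ t)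
    (hi : i < s.length) (hj : j < t.length) :
    enc s i = enc t j ↔ i = j ∧ s.length = t.length ∧ mex s t i := by
  constructor
  · intro h
    have hlen : s.length = t.length := by
      rw [← length_enc hi, ← length_enc hj, h]
    have hij : i = j := by
      by_contra hne
      have h1 : (enc s i)[i]? = some '*' := getElem?_enc_self hi
      have h2 : (enc t j)[i]? = t[i]? := getElem?_enc_ne hj (by omega) hne
      rw [h, h2] at h1
      have : '*' ∈ t := by
        have := List.getElem?_eq_some_iff.1 h1
        obtain ⟨hlt, hget⟩ := this
        exact hget ▸ List.getElem_mem _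
      exact ht this
    subst hij
    refine ⟨rfl, hlen, ?_⟩
    have hlt : (s.take i).length = (t.take i).length := by simp; omega
    obtain ⟨h1, h2⟩ := List.append_inj h hlt
    injection h2 with _ h3
    exact ⟨h1, h3⟩
  · rintro ⟨rfl, hlen, h1, h2⟩
    simp only [enc]
    rw [h1, h2]

lemma mem_encs_iff {s t : List Char} {i : Nat} (hs : '*' ∉ s) (ht : '*' ∉ t) (hi : i < s.length) :
    (∃ j, j < t.length ∧ enc s i = enc t j) ↔ (s.length = t.length ∧ mex s t i) := by
  constructor
  · rintro ⟨j, hj, h⟩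
    obtain ⟨rfl, h2, h3⟩ := (enc_eq_iff hs ht hi hj).1 h
    exact ⟨h2, h3⟩
  · rintro ⟨hlen, hmex⟩
    exact ⟨i, by omega, (enc_eq_iff hs ht hi (by omega)).2 ⟨rfl, hlen, hmex⟩⟩

def d1b (s t : List Char) : Bool := decide (s.length = t.length ∧ mm s t = 1)

def cnt1 (p : List Int) (num : Int) : Int :=
  (p.countP (fun m => d1b (PySem.Int.toChars m) (PySem.Int.toChars num)) : Int)

def occ (p : List Int) (e : List Char) : Nat :=
  p.countP (fun m => decide (∃ i, i < (PySem.Int.toChars m).length ∧ e = enc (PySem.Int.toChars m) i))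

lemma count_le_occ {p : List Int} {num : Int} {i : Nat} (hi : i < (PySem.Int.toChars num).length) :
    p.count num ≤ occ p (enc (PySem.Int.toChars num) i) := by
  rw [List.count, occ]
  apply List.countP_mono_left
  intro m _ hm
  have : m = num := by simpa using hm
  subst this
  simp only [decide_eq_true_eq]
  exact ⟨i, hi, rfl⟩

lemma occ_append {p : List Int} {num : Int} {e : List Char} :
    occ (p ++ [num]) e =
      occ p e + (if ∃ i, i < (PySem.Int.toChars num).length ∧ e = enc (PySem.Int.toChars num) i then 1 else 0) := by
  rw [occ, occ, List.countP_append]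
  simp [List.countP_cons]

lemma sum_map_sub_const (l : List Nat) (f : Nat → Int) (c : Int) :
    (l.map (fun i => f i - c)).sum = (l.map f).sum - l.length * c := by
  induction l with
  | nil => simp
  | cons a l ih => simp [ih]; ring

lemma cnt1_cons (m : Int) (p : List Int) (num : Int) :
    cnt1 (m :: p) num = cnt1 p num
      + (if d1b (PySem.Int.toChars m) (PySem.Int.toChars num) then 1 else 0) := by
  simp [cnt1, List.countP_cons]

lemma key_sum (p : List Int) (num : Int) :
    ((List.range (PySem.Int.toChars num).length).map
        (fun i => (occ p (enc (PySem.Int.toChars num) i) : Int))).sum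
      = ((PySem.Int.toChars num).length : Int) * p.count num + cnt1 p num := by
  induction p with
  | nil => simp [occ, cnt1]
  | cons m p ih =>
    have hstar_s : '*' ∉ PySem.Int.toChars num := toChars_star num
    have hstar_t : '*' ∉ PySem.Int.toChars m := toChars_star m
    have hocc : ∀ i ∈ List.range (PySem.Int.toChars num).length,
        (occ (m :: p) (enc (PySem.Int.toChars num) i) : Int)
        = (occ p (enc (PySem.Int.toChars num) i) : Int)
          + (if (fun i => decide ((PySem.Int.toChars num).length = (PySem.Int.toChars m).length
              ∧ mex (PySem.Int.toChars num) (PySem.Int.toChars m) i)) i = true then 1 else 0) := by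
      intro i hi
      have hi' : i < (PySem.Int.toChars num).length := List.mem_range.1 hi
      have hiff := mem_encs_iff (t := PySem.Int.toChars m) hstar_s hstar_t hi'
      rw [occ, List.countP_cons, occ]
      by_cases h : (PySem.Int.toChars num).length = (PySem.Int.toChars m).length
          ∧ mex (PySem.Int.toChars num) (PySem.Int.toChars m) i
      · have h2 := hiff.2 h
        simp [h, h2]
      · have h2 : ¬ ∃ j, j < (PySem.Int.toChars m).length
            ∧ enc (PySem.Int.toChars num) i = enc (PySem.Int.toChars m) j := fun hc => h (hiff.1 hc)
        simp [h, h2]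
    rw [List.map_congr_left hocc, PySem.List.sum_map_add_int, ih,
        PySem.List.sum_map_ite_one_zero, cnt1_cons]
    by_cases hlen : (PySem.Int.toChars num).length = (PySem.Int.toChars m).length
    · have hcongr : ∀ i ∈ List.range (PySem.Int.toChars num).length,
          ((decide ((PySem.Int.toChars num).length = (PySem.Int.toChars m).length
              ∧ mex (PySem.Int.toChars num) (PySem.Int.toChars m) i)) = true)
          ↔ ((fun i => decide (mex (PySem.Int.toChars num) (PySem.Int.toChars m) i)) i = true) := by
        intro i _; simp [hlen]
      rw [List.countP_congr hcongr, countP_mex _ _ hlen]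
      by_cases hst : PySem.Int.toChars num = PySem.Int.toChars m
      · obtain rfl : m = num := (toChars_inj hst).symm
        have hd : d1b (PySem.Int.toChars m) (PySem.Int.toChars m) = false := by
          have : mm (PySem.Int.toChars m) (PySem.Int.toChars m) = 0 := (mm_eq_zero rfl).2 rfl
          simp [d1b, this]
        rw [List.count_cons_self, hd, if_pos hst]
        push_cast
        ring
      · have hm : m ≠ num := fun hc => hst (by rw [hc])
        have hd : d1b (PySem.Int.toChars m) (PySem.Int.toChars num)
            = decide (mm (PySem.Int.toChars num) (PySem.Int.toChars m) = 1) := by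
          simp [d1b, hlen.symm, mm_comm (PySem.Int.toChars m) (PySem.Int.toChars num)]
        rw [List.count_cons_of_ne hm, if_neg hst, hd]
        by_cases hmm : mm (PySem.Int.toChars num) (PySem.Int.toChars m) = 1 <;>
          simp [hmm] <;> push_cast <;> ring
    · have h0 : (List.range (PySem.Int.toChars num).length).countP
          (fun i => decide ((PySem.Int.toChars num).length = (PySem.Int.toChars m).length
              ∧ mex (PySem.Int.toChars num) (PySem.Int.toChars m) i)) = 0 := by
        apply List.countP_eq_zero.2
        intro i _
        simp [hlen]
      have hm : m ≠ num := fun hc => hlen (by rw [hc])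
      have hd : d1b (PySem.Int.toChars m) (PySem.Int.toChars num) = false := by
        simp only [d1b, decide_eq_false_iff_not]
        rintro ⟨h1, _⟩; exact hlen h1.symm
      rw [h0, List.count_cons_of_ne hm, hd]
      simp

def encVal (p : List Int) (e : List Char) : Option Int :=
  if occ p e = 0 then none else some ((occ p e : Int) - 1)

def visVal (p : List Int) (n : Int) : Option Int :=
  if p.count n = 0 then none else some ((p.count n : Int))

lemma encStr_toList (num : Int) (k : Nat) :
    (PySem.Str.slice (PySem.Int.toStr num) none (some (k : Int)) ++ "*"
      ++ PySem.Str.slice (PySem.Int.toStr num) (some ((k : Int) + 1)) none).toList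
    = enc (PySem.Int.toChars num) k := by
  rw [String.toList_append, String.toList_append, PySem.Str.toList_slice, PySem.Str.toList_slice,
      PySem.Chars.slice_eq_listSlice, PySem.Chars.slice_eq_listSlice, PySem.Int.toList_toStr]
  rw [PySem.List.slice_to_natCast]
  have h1 : (k : Int) + 1 = ((k + 1 : Nat) : Int) := by push_cast; ring
  rw [h1, PySem.List.slice_from_natCast]
  show _ ++ ['*'] ++ _ = _
  rw [enc, List.append_assoc]
  rfl

lemma innerA (p : List Int) (num : Int) (r : Int) (E : PySem.Dict String Int) (V : PySem.Dict Int Int)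
    (hE : ∀ e : String, E.get? e = encVal p e.toList) (hV : ∀ n, V.get? n = visVal p n) :
    ∀ k, k ≤ (PySem.Int.toChars num).length →
    ((List.range k).foldl (fun st2 (j : Nat) => innerStepA V num (PySem.Int.toStr num) st2 (j : Int)) (r, E)).1
      = r + (((List.range k).map
          (fun i => (occ p (enc (PySem.Int.toChars num) i) : Int) - (p.count num : Int))).sum)
    ∧ ∀ e : String,
        ((List.range k).foldl (fun st2 (j : Nat) => innerStepA V num (PySem.Int.toStr num) st2 (j : Int)) (r, E)).2.get? e
          = if ∃ i, i < k ∧ e.toList = enc (PySem.Int.toChars num) i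
            then encVal (p ++ [num]) e.toList else encVal p e.toList := by
  intro k
  induction k with
  | zero =>
    intro _
    constructor
    · simp
    · intro e
      have : ¬ ∃ i, i < 0 ∧ e.toList = enc (PySem.Int.toChars num) i := by
        rintro ⟨i, hi, _⟩; omega
      rw [if_neg this]
      exact hE e
  | succ k ihk =>
    intro hk1
    have hk : k ≤ (PySem.Int.toChars num).length := Nat.le_of_succ_le hk1
    have hklt : k < (PySem.Int.toChars num).length := hk1
    obtain ⟨ih1, ih2⟩ := ihk hk
    have hstar : '*' ∉ PySem.Int.toChars num := toChars_star num
    rw [List.range_succ, List.foldl_append]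
    set st := (List.range k).foldl (fun st2 (j : Nat) => innerStepA V num (PySem.Int.toStr num) st2 (j : Int)) (r, E) with hst
    simp only [List.foldl_cons, List.foldl_nil]
    rw [innerStepA]
    set ne := PySem.Str.slice (PySem.Int.toStr num) none (some (k : Int)) ++ "*"
      ++ PySem.Str.slice (PySem.Int.toStr num) (some ((k : Int) + 1)) none with hne
    have henc : ne.toList = enc (PySem.Int.toChars num) k := encStr_toList num k
    have hnotk : ¬ ∃ i, i < k ∧ ne.toList = enc (PySem.Int.toChars num) i := by
      rintro ⟨i, hik, hi⟩
      rw [henc] at hi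
      obtain ⟨hki, -, -⟩ := (enc_eq_iff hstar hstar hklt (by omega)).1 hi
      omega
    have hgetE : st.2.get? ne = encVal p (enc (PySem.Int.toChars num) k) := by
      rw [ih2 ne, if_neg hnotk, henc]
    have hcont : st.2.contains ne = (encVal p (enc (PySem.Int.toChars num) k)).isSome := by
      rw [PySem.Dict.contains_eq_isSome_get?, hgetE]
    have hocck1 : occ (p ++ [num]) (enc (PySem.Int.toChars num) k)
        = occ p (enc (PySem.Int.toChars num) k) + 1 := by
      rw [occ_append, if_pos ⟨k, hklt, rfl⟩]
    have hEnew : ∀ (v : Int) (e : String), ((st.2.insert ne v).get? e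
          = if e.toList = enc (PySem.Int.toChars num) k then some v
            else if ∃ i, i < k ∧ e.toList = enc (PySem.Int.toChars num) i
            then encVal (p ++ [num]) e.toList else encVal p e.toList) := by
      intro v e
      rw [PySem.Dict.get?_insert]
      by_cases he : e = ne
      · rw [if_pos he, if_pos (by rw [he, henc])]
      · rw [if_neg he, if_neg (fun hc => he (String.ext (by rw [hc, henc]))), ih2 e]
    have hifsucc : ∀ e : String, e.toList ≠ enc (PySem.Int.toChars num) k →
        ((∃ i, i < k + 1 ∧ e.toList = enc (PySem.Int.toChars num) i)
          ↔ (∃ i, i < k ∧ e.toList = enc (PySem.Int.toChars num) i)) := by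
      intro e hnek
      constructor
      · rintro ⟨i, hik, hi⟩
        rcases Nat.lt_succ_iff_lt_or_eq.1 hik with h | rfl
        · exact ⟨i, h, hi⟩
        · exact absurd hi hnek
      · rintro ⟨i, hik, hi⟩; exact ⟨i, by omega, hi⟩
    have hsum1 : (((List.range k ++ [k]).map
          (fun i => (occ p (enc (PySem.Int.toChars num) i) : Int) - (p.count num : Int))).sum)
        = (((List.range k).map
          (fun i => (occ p (enc (PySem.Int.toChars num) i) : Int) - (p.count num : Int))).sum)
          + ((occ p (enc (PySem.Int.toChars num) k) : Int) - (p.count num : Int)) := by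
      rw [List.map_append, List.sum_append]
      simp
    by_cases hocc0 : occ p (enc (PySem.Int.toChars num) k) = 0
    · have : st.2.contains ne = false := by rw [hcont, encVal, if_pos hocc0]; rfl
      rw [if_pos (by rw [this])]
      have hcnt0 : p.count num = 0 := by
        have := count_le_occ (p := p) hklt
        omega
      constructor
      · show st.1 = _
        rw [ih1, hsum1, hocc0, hcnt0]
        simp
      · intro e
        show (st.2.insert ne 0).get? e = _
        rw [hEnew 0 e]
        by_cases hek : e.toList = enc (PySem.Int.toChars num) k
        · rw [if_pos hek, if_pos ⟨k, by omega, hek⟩, hek, encVal, hocck1, hocc0]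
          norm_num
        · rw [if_neg hek, if_congr (hifsucc e hek) rfl rfl]
    · have : st.2.contains ne = true := by
        rw [hcont, encVal, if_neg hocc0]; rfl
      rw [if_neg (by rw [this]; simp)]
      have hgetD : st.2.getD ne 0 = (occ p (enc (PySem.Int.toChars num) k) : Int) - 1 := by
        rw [PySem.Dict.getD_eq_get?_getD, hgetE, encVal, if_neg hocc0]
        rfl
      have hgetD' : (st.2.insert ne (st.2.getD ne 0 + 1)).getD ne 0
          = (occ p (enc (PySem.Int.toChars num) k) : Int) - 1 + 1 := by
        rw [PySem.Dict.getD_insert_self, hgetD]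
      have hEpart : ∀ e : String, ((st.2.insert ne (st.2.getD ne 0 + 1)).get? e
          = if ∃ i, i < k + 1 ∧ e.toList = enc (PySem.Int.toChars num) i
            then encVal (p ++ [num]) e.toList else encVal p e.toList) := by
        intro e
        rw [hEnew _ e]
        by_cases hek : e.toList = enc (PySem.Int.toChars num) k
        · rw [if_pos hek, if_pos ⟨k, by omega, hek⟩, hek, encVal, hocck1, if_neg (by omega), hgetD]
          congr 1
          push_cast
          ring
        · rw [if_neg hek, if_congr (hifsucc e hek) rfl rfl]
      by_cases hvis : V.contains num = true
      · rw [if_pos hvis]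
        have hcntpos : p.count num ≠ 0 := by
          intro hc
          rw [PySem.Dict.contains_eq_isSome_get?, hV num, visVal, if_pos hc] at hvis
          simp at hvis
        have hgetV : V.getD num 0 = (p.count num : Int) := by
          rw [PySem.Dict.getD_eq_get?_getD, hV num, visVal, if_neg hcntpos]
          rfl
        refine ⟨?_, hEpart⟩
        show st.1 + _ - _ = _
        rw [hgetD', hgetV, ih1, hsum1]
        ring
      · rw [if_neg hvis]
        have hcnt0 : p.count num = 0 := by
          by_contra hc
          rw [PySem.Dict.contains_eq_isSome_get?, hV num, visVal, if_neg hc] at hvis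
          simp at hvis
        refine ⟨?_, hEpart⟩
        show st.1 + _ = _
        rw [hgetD', ih1, hsum1, hcnt0]
        push_cast
        ring

def pairsSpec : List Int → List Int → Int
  | _, [] => 0
  | pre, x :: rest => cnt1 pre x + pairsSpec (pre ++ [x]) rest

lemma pyRange_len_foldl (num : Int) (init : Int × PySem.Dict String Int) (V : PySem.Dict Int Int) :
    (PySem.List.pyRange 0 (PySem.Str.len (PySem.Int.toStr num)) 1).foldl
        (innerStepA V num (PySem.Int.toStr num)) init
      = (List.range (PySem.Int.toChars num).length).foldl
        (fun st2 (j : Nat) => innerStepA V num (PySem.Int.toStr num) st2 (j : Int)) init := by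
  rw [PySem.Str.len_eq, PySem.Int.toList_toStr, PySem.List.pyRange_one]
  have h1 : (((PySem.Int.toChars num).length : Int) - 0).toNat = (PySem.Int.toChars num).length := by
    omega
  rw [h1, List.foldl_map]
  congr 1
  funext st2 j
  rw [zero_add]

lemma stepA_spec (p : List Int) (num : Int) (r : Int) (E : PySem.Dict String Int) (V : PySem.Dict Int Int)
    (hE : ∀ e : String, E.get? e = encVal p e.toList) (hV : ∀ n, V.get? n = visVal p n) :
    (stepA (r, E, V) num).1 = r + cnt1 p num
    ∧ (∀ e : String, (stepA (r, E, V) num).2.1.get? e = encVal (p ++ [num]) e.toList)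
    ∧ (∀ n, (stepA (r, E, V) num).2.2.get? n = visVal (p ++ [num]) n) := by
  obtain ⟨h1, h2⟩ := innerA p num r E V hE hV (PySem.Int.toChars num).length le_rfl
  simp only [stepA]
  rw [pyRange_len_foldl]
  refine ⟨?_, ?_, ?_⟩
  · show (_ : Int × PySem.Dict String Int).1 = _
    rw [h1, sum_map_sub_const, key_sum]
    simp
  · intro e
    show (_ : Int × PySem.Dict String Int).2.get? e = _
    rw [h2 e]
    by_cases hex : ∃ i, i < (PySem.Int.toChars num).length ∧ e.toList = enc (PySem.Int.toChars num) i
    · rw [if_pos hex]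
    · rw [if_neg hex]
      rw [encVal, encVal, occ_append, if_neg hex]
      simp
  · intro n
    rw [PySem.Dict.get?_insert]
    have hcount : List.count n (p ++ [num]) = List.count n p + (if n = num then 1 else 0) := by
      rw [List.count_append]
      by_cases h : n = num <;> simp [h, List.count_singleton] <;> omega
    by_cases hn : n = num
    · rw [if_pos hn]
      subst hn
      have hgd : (if V.contains n = false then V.insert n 0 else V).getD n 0 = (List.count n p : Int) := by
        by_cases hc : V.contains n = true
        · have hcnt : List.count n p ≠ 0 := by
            intro h0
            rw [PySem.Dict.contains_eq_isSome_get?, hV n, visVal, if_pos h0] at hc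
            simp at hc
          rw [if_neg (by rw [hc]; simp), PySem.Dict.getD_eq_get?_getD, hV n, visVal, if_neg hcnt]
          rfl
        · have hcnt : List.count n p = 0 := by
            by_contra h0
            rw [PySem.Dict.contains_eq_isSome_get?, hV n, visVal, if_neg h0] at hc
            simp at hc
          rw [if_pos (by simpa using hc), PySem.Dict.getD_insert_self, hcnt]
          rfl
      rw [hgd, visVal, hcount, if_pos rfl, if_neg (by omega)]
      push_cast
      ring_nf
    · rw [if_neg hn]
      have hV1 : (if V.contains num = false then V.insert num 0 else V).get? n = V.get? n := by
        by_cases hc : V.contains num = false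
        · rw [if_pos hc, PySem.Dict.get?_insert_of_ne _ _ hn]
        · rw [if_neg hc]
      rw [hV1, hV n, visVal, visVal, hcount, if_neg hn]
      simp


lemma foldA (rest : List Int) : ∀ (p : List Int) (r : Int) (E : PySem.Dict String Int) (V : PySem.Dict Int Int),
    (∀ e : String, E.get? e = encVal p e.toList) → (∀ n, V.get? n = visVal p n) →
    (rest.foldl stepA (r, E, V)).1 = r + pairsSpec p rest := by
  induction rest with
  | nil => intro p r E V _ _; simp [pairsSpec]
  | cons num rest ih =>
    intro p r E V hE hV
    rw [List.foldl_cons]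
    obtain ⟨h1, h2, h3⟩ := stepA_spec p num r E V hE hV
    have hst : stepA (r, E, V) num
        = ((stepA (r, E, V) num).1, (stepA (r, E, V) num).2.1, (stepA (r, E, V) num).2.2) := rfl
    rw [hst, h1]
    rw [ih (p ++ [num]) (r + cnt1 p num) _ _ h2 h3]
    show r + cnt1 p num + pairsSpec (p ++ [num]) rest = r + pairsSpec p (num :: rest)
    rw [pairsSpec]
    ring

lemma foldB_inner (num : Int) : ∀ (pre : List Int) (c : Int),
    ((pre.map PySem.Int.toStr).foldl (fun c s =>
      if PySem.Str.len s = PySem.Str.len (PySem.Int.toStr num) ∧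
         (((s.toList.zip (PySem.Int.toStr num).toList).countP (fun p => p.1 != p.2) : Int)) = 1
      then c + 1 else c) c) = c + cnt1 pre num := by
  intro pre
  induction pre with
  | nil => intro c; simp [cnt1]
  | cons m pre ih =>
    intro c
    rw [List.map_cons, List.foldl_cons]
    have hcond : (PySem.Str.len (PySem.Int.toStr m) = PySem.Str.len (PySem.Int.toStr num) ∧
         ((((PySem.Int.toStr m).toList.zip (PySem.Int.toStr num).toList).countP (fun p => p.1 != p.2) : Int)) = 1)
        ↔ (d1b (PySem.Int.toChars m) (PySem.Int.toChars num) = true) := by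
      rw [PySem.Str.len_eq, PySem.Str.len_eq, PySem.Int.toList_toStr, PySem.Int.toList_toStr]
      simp only [d1b, decide_eq_true_eq, mm]
      constructor
      · rintro ⟨hl, hc⟩
        exact ⟨by exact_mod_cast hl, by exact_mod_cast hc⟩
      · rintro ⟨hl, hc⟩
        exact ⟨by exact_mod_cast hl, by exact_mod_cast hc⟩
    rw [cnt1_cons]
    by_cases h : d1b (PySem.Int.toChars m) (PySem.Int.toChars num) = true
    · rw [if_pos (hcond.2 h), ih, if_pos h]
      ring
    · rw [if_neg (fun hc => h (hcond.1 hc)), ih, if_neg h]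
      ring

lemma foldB (rest : List Int) : ∀ (p : List Int) (c : Int),
    (rest.foldl stepB (c, p.map PySem.Int.toStr)).1 = c + pairsSpec p rest := by
  induction rest with
  | nil => intro p c; simp [pairsSpec]
  | cons num rest ih =>
    intro p c
    rw [List.foldl_cons]
    have hstep : stepB (c, p.map PySem.Int.toStr) num
        = (c + cnt1 p num, (p ++ [num]).map PySem.Int.toStr) := by
      simp only [stepB]
      rw [foldB_inner num p c]
      simp
    rw [hstep, ih (p ++ [num]) (c + cnt1 p num)]
    rw [pairsSpec]
    ring


-- ===== VERDICT (by name: the statement is the Claim_ definition above) =====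
theorem solution_spec : Claim_equal_solution := by
  intro nums _
  show solution nums = solution_alt nums
  have hA : solution nums = 0 + pairsSpec [] nums := by
    apply foldA nums [] 0 PySem.Dict.empty PySem.Dict.empty
    · intro e; simp [encVal, occ]
    · intro n; simp [visVal]
  have hB : solution_alt nums = 0 + pairsSpec [] nums := foldB nums [] 0
  rw [hA, hB]
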